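-- pv_equiv track=rewrite | github.com/Machomih/AI | main.py | is_final_state
-- ===== SOURCE A (Python) =====
-- def is_final_state(state):
--     final_states = [[1, 2, 3, 4, 5, 6, 7, 8, 0],
--                     [1, 2, 3, 4, 5, 6, 7, 0, 8],
--                     [1, 2, 3, 4, 5, 6, 0, 7, 8],
--                     [1, 2, 3, 4, 5, 0, 6, 7, 8],
--                     [1, 2, 3, 4, 0, 5, 6, 7, 8],
--                     [1, 2, 3, 0, 4, 5, 6, 7, 8],
--                     [1, 2, 0, 3, 4, 5, 6, 7, 8],
--                     [1, 0, 2, 3, 4, 5, 6, 7, 8],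
--                     [0, 1, 2, 3, 4, 5, 6, 7, 8]]
--
--     for final_state in final_states:
--         if state == final_state:
--             return True
--     return False
-- ===== SOURCE B (Python) =====
-- def is_final_state(state):
--     nonzero = [x for x in state if x != 0]
--     return len(state) == 9 and nonzero == [1, 2, 3, 4, 5, 6, 7, 8]
-- ===== Notes on version B (the rewrite author's own statement) =====
-- stated objective: simpler
-- what changed: Replaced the 9-entry goal-state table and linear membership scan with a direct structural predicate: length 9 and the non-zero entries in order equal [1..8].
import Mathlib
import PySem

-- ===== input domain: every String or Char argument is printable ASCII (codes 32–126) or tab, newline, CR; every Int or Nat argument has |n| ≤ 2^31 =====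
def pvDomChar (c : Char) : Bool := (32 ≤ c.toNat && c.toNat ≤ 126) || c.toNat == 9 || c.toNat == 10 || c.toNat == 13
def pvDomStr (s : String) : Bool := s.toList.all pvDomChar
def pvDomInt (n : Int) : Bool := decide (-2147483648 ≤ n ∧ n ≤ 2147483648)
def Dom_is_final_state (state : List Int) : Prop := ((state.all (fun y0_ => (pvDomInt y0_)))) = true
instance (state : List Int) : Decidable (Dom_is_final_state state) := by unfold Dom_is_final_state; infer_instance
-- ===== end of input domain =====

-- B replaces A's 9-entry goal-state table and membership scan by the direct predicate
-- "length 9 and the non-zero entries in order are [1..8]" (simpler; same results).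


-- ===== PORT A =====
-- the literal table of the nine goal states
def pvFinalStates : List (List Int) :=
  [[1, 2, 3, 4, 5, 6, 7, 8, 0],
   [1, 2, 3, 4, 5, 6, 7, 0, 8],
   [1, 2, 3, 4, 5, 6, 0, 7, 8],
   [1, 2, 3, 4, 5, 0, 6, 7, 8],
   [1, 2, 3, 4, 0, 5, 6, 7, 8],
   [1, 2, 3, 0, 4, 5, 6, 7, 8],
   [1, 2, 0, 3, 4, 5, 6, 7, 8],
   [1, 0, 2, 3, 4, 5, 6, 7, 8],
   [0, 1, 2, 3, 4, 5, 6, 7, 8]]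

-- the 'for final_state in final_states: if state == final_state: return True' loop
def pvFinalLoop (state : List Int) : List (List Int) → Bool
  | [] => false
  | f :: rest => if state == f then true else pvFinalLoop state rest

def is_final_state (state : List Int) : Bool :=
  pvFinalLoop state pvFinalStates

-- ===== PORT B =====
def is_final_state_alt (state : List Int) : Bool :=
  let nonzero := state.filter (fun x => x != 0)
  state.length == 9 && nonzero == [1, 2, 3, 4, 5, 6, 7, 8]

-- ===== PRECONDITION & SPEC =====
def Spec_is_final_state (state : List Int) (out : Bool) : Prop := out = is_final_state_alt state
instance (state : List Int) (out : Bool) : Decidable (Spec_is_final_state state out) := by unfold Spec_is_final_state; infer_instance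

-- ===== CLAIM (what is proved, stated in full; the proofs are below) =====
def Claim_equal_is_final_state : Prop := ∀ (state : List Int), Dom_is_final_state state → Spec_is_final_state state (is_final_state state)

-- ===== LEMMAS AND PROOFS =====

theorem pvFinalLoop_eq_mem (state : List Int) (fs : List (List Int)) :
    pvFinalLoop state fs = true ↔ state ∈ fs := by
  induction fs with
  | nil => simp [pvFinalLoop]
  | cons f rest ih =>
    simp only [pvFinalLoop, List.mem_cons]
    split_ifs with h
    · simp_all
    · simp_all

-- a list one longer than its non-zero filtrate is that filtrate with a single 0 inserted
theorem pv_filter_insert (l : List Int) :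
    ∀ r : List Int, l.filter (fun x => x != 0) = r → l.length = r.length + 1 →
      ∃ i, i ≤ r.length ∧ l = r.insertIdx i 0 := by
  induction l with
  | nil => intro r h hl; simp at hl
  | cons x t ih =>
    intro r h hl
    by_cases hx : x = 0
    · subst hx
      simp only [List.filter_cons] at h
      norm_num at h
      have hlen : t.length = r.length := by simpa using hl
      have : t.filter (fun x => x != 0) = t := by
        apply List.filter_eq_self.mpr
        intro a ha
        by_contra hc
        have hle := List.length_filter_le (fun x => x != 0) t
        have hlt : (t.filter (fun x => x != 0)).length < t.length := by
          apply lt_of_le_of_ne hle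
          intro he
          have := (List.length_filter_eq_length_iff).mp he a ha
          exact hc this
        have hfl : (t.filter (fun x => x != 0)).length = r.length := by rw [h]
        omega
      have ht : t = r := by rw [← h, this]
      exact ⟨0, by omega, by simp [List.insertIdx, ht]⟩
    · have hx' : (x != 0) = true := by simpa using hx
      simp only [List.filter_cons, hx', if_pos] at h
      cases r with
      | nil => simp at h
      | cons y r' =>
        have hy : x = y ∧ t.filter (fun x => x != 0) = r' := by
          constructor
          · exact (List.cons.injEq _ _ _ _ ▸ h).1
          · exact (List.cons.injEq _ _ _ _ ▸ h).2
        obtain ⟨hy1, hy2⟩ := hy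
        have hl' : t.length = r'.length + 1 := by simpa using hl
        obtain ⟨i, hi, ht⟩ := ih r' hy2 hl'
        refine ⟨i + 1, by simpa using hi, ?_⟩
        simp [List.insertIdx, hy1, ht]

theorem pv_equiv (state : List Int) : is_final_state state = is_final_state_alt state := by
  by_cases hA : is_final_state state = true
  · have hmem := (pvFinalLoop_eq_mem state pvFinalStates).mp hA
    rw [hA]
    simp only [pvFinalStates, List.mem_cons, List.not_mem_nil, or_false] at hmem
    rcases hmem with h|h|h|h|h|h|h|h|h <;> subst h <;> decide
  · have hB : is_final_state_alt state ≠ true := by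
      intro hb
      apply hA
      simp only [is_final_state_alt, Bool.and_eq_true, beq_iff_eq] at hb
      obtain ⟨hlen, hfil⟩ := hb
      have hlen' : state.length = 9 := by simpa using hlen
      obtain ⟨i, hi, hins⟩ := pv_filter_insert state [1,2,3,4,5,6,7,8] hfil (by simp [hlen'])
      apply (pvFinalLoop_eq_mem state pvFinalStates).mpr
      simp only [List.length] at hi
      interval_cases i <;> simp_all <;> decide
    simp_all
  
-- ===== VERDICT (by name: the statement is the Claim_ definition above) =====
theorem is_final_state_spec : Claim_equal_is_final_state := by
  intro state _
  unfold Spec_is_final_state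
  exact pv_equiv state
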